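-- pv_equiv track=rewrite | github.com/EduardoIsaacC/Algoritmos_Enfoque_IA | 001_B_e_G/1.1.3_Algoritmos_Geneticos_Satisfaccion_De_Restricciones/022.BG_Bus_Local_Minimos_Conflictos.py | contar_conflictos
-- ===== SOURCE A (Python) =====
-- restricciones = [
--     ("A", "B"), ("A", "C"),
--     ("B", "C"), ("B", "D"),
--     ("C", "D")
-- ]
--
-- def contar_conflictos(var, valor, asignacion):
--     conflictos = 0
--     for (x, y) in restricciones:
--         if x == var and y in asignacion and asignacion[y] == valor:
--             conflictos += 1
--         if y == var and x in asignacion and asignacion[x] == valor: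
--             conflictos += 1
--     return conflictos
-- ===== SOURCE B (Python) =====
-- restricciones = [
--     ("A", "B"), ("A", "C"),
--     ("B", "C"), ("B", "D"),
--     ("C", "D")
-- ]
--
-- # neighbor index built once from the restriction pairs
-- vecinos = {}
-- for _x, _y in restricciones:
--     vecinos.setdefault(_x, []).append(_y)
--     vecinos.setdefault(_y, []).append(_x)
--
-- def contar_conflictos(var, valor, asignacion):
--     return sum(1 for w in vecinos.get(var, [])
--                if w in asignacion and asignacion[w] == valor)
-- ===== Notes on version B (the rewrite author's own statement) =====
-- stated objective: idiomatic
-- what changed: B precomputes a neighbor adjacency dict from the fixed restriction list once at module level and counts matching assigned neighbors of var in one generator sum, instead of scanning every restriction pair with two directional conditionals per pair.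
import Mathlib
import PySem

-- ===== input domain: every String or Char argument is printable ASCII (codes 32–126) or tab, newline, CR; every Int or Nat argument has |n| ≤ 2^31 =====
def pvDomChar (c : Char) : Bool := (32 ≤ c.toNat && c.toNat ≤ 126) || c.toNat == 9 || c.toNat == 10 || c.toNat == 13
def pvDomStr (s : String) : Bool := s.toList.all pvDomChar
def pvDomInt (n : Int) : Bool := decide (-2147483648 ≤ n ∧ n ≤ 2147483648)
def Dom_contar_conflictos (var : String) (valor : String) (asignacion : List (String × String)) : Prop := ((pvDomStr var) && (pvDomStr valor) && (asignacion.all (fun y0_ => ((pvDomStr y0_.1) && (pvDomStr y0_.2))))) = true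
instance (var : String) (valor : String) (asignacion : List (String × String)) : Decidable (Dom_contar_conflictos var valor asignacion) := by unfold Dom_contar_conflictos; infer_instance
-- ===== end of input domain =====

-- B replaces A's scan over all restriction pairs (with two directional tests each) by a
-- precomputed neighbor index, counting matching neighbors of `var` only (idiomatic/alternative).

-- ===== PORT A =====
-- module-level constant `restricciones`
def restriccionesL : List (String × String) :=
  [("A", "B"), ("A", "C"), ("B", "C"), ("B", "D"), ("C", "D")]

-- `y in asignacion and asignacion[y] == valor` = first-match lookup yields `valor`
def contar_conflictos (var : String) (valor : String) (asignacion : List (String × String)) : Int :=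
  restriccionesL.foldl (fun conflictos xy =>
    let conflictos :=
      if xy.1 == var && (((asignacion.lookup xy.2).map (fun v => v == valor)).getD false) then
        conflictos + 1 else conflictos
    if xy.2 == var && (((asignacion.lookup xy.1).map (fun v => v == valor)).getD false) then
      conflictos + 1 else conflictos) 0

-- ===== PORT B =====
-- neighbor index built once from the restriction pairs (module-level loop of Source B)
def vecinosD : PySem.Dict String (List String) :=
  restriccionesL.foldl (fun d xy =>
    let d := d.insert xy.1 (d.getD xy.1 [] ++ [xy.2])
    d.insert xy.2 (d.getD xy.2 [] ++ [xy.1])) PySem.Dict.empty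

-- sum(1 for w in vecinos.get(var, []) if w in asignacion and asignacion[w] == valor)
def contar_conflictos_alt (var : String) (valor : String) (asignacion : List (String × String)) : Int :=
  (((vecinosD.getD var []).filter
      (fun w => ((asignacion.lookup w).map (fun v => v == valor)).getD false)).length : Int)

-- ===== PRECONDITION & SPEC =====
def Spec_contar_conflictos (var : String) (valor : String) (asignacion : List (String × String)) (out : Int) : Prop := out = contar_conflictos_alt var valor asignacion
instance (var : String) (valor : String) (asignacion : List (String × String)) (out : Int) : Decidable (Spec_contar_conflictos var valor asignacion out) := by unfold Spec_contar_conflictos; infer_instance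

-- ===== CLAIM (what is proved, stated in full; the proofs are below) =====
def Claim_equal_contar_conflictos : Prop := ∀ (var : String) (valor : String) (asignacion : List (String × String)), Dom_contar_conflictos var valor asignacion → Spec_contar_conflictos var valor asignacion (contar_conflictos var valor asignacion)

-- ===== LEMMAS AND PROOFS =====
theorem vecinosD_eval : vecinosD = PySem.Dict.mk
    [("A", ["B","C"]), ("B", ["A","C","D"]), ("C", ["A","B","D"]), ("D", ["B","C"])] := by
  rfl

-- ===== VERDICT (by name: the statement is the Claim_ definition above) =====
theorem contar_conflictos_spec : Claim_equal_contar_conflictos := by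
  intro var valor asignacion _
  unfold Spec_contar_conflictos
  by_cases hA : var = "A"
  · subst hA
    simp only [contar_conflictos, contar_conflictos_alt, vecinosD_eval, restriccionesL, List.foldl]
    simp [PySem.Dict.getD, PySem.Dict.get?_mk_cons, List.filter_cons, List.filter_nil]
    split_ifs <;> simp
  by_cases hB : var = "B"
  · subst hB
    simp only [contar_conflictos, contar_conflictos_alt, vecinosD_eval, restriccionesL, List.foldl]
    simp [PySem.Dict.getD, PySem.Dict.get?_mk_cons, List.filter_cons, List.filter_nil]
    split_ifs <;> simp
  by_cases hC : var = "C"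
  · subst hC
    simp only [contar_conflictos, contar_conflictos_alt, vecinosD_eval, restriccionesL, List.foldl]
    simp [PySem.Dict.getD, PySem.Dict.get?_mk_cons, List.filter_cons, List.filter_nil]
    split_ifs <;> simp
  by_cases hD : var = "D"
  · subst hD
    simp only [contar_conflictos, contar_conflictos_alt, vecinosD_eval, restriccionesL, List.foldl]
    simp [PySem.Dict.getD, PySem.Dict.get?_mk_cons, List.filter_cons, List.filter_nil]
    split_ifs <;> simp
  · simp [contar_conflictos, contar_conflictos_alt, vecinosD_eval, restriccionesL,
      PySem.Dict.getD, PySem.Dict.get?_mk_cons, beq_iff_eq,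
      Ne.symm hA, Ne.symm hB, Ne.symm hC, Ne.symm hD]
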